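-- pv_equiv track=rewrite | github.com/ChaozhongLiu/DyberPet | DyberPet/utils.py | MaskPhrase
-- ===== SOURCE A (Python) =====
-- def MaskPhrase(phrase):
--     def mask_word(word):
--         if len(word) <= 3:
--             return "?" * len(word)
--         else:
--             return word[0] + "?" * (len(word) - 2) + word[-1]
--
--     # Splitting the phrase into words and spaces
--     words = []
--     current_word = ""
--     for char in phrase:
--         if char.isspace():
--             if current_word:  # Add the current word to the list before the space
--                 words.append(current_word)
--                 current_word = ""
--             words.append(char)  # Add the space as a separate element
--         else:
--             current_word += char
--     if current_word:  # Add the last word if there is one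
--         words.append(current_word)
--
--     # Mask each word and join back into a phrase
--     masked_words = [mask_word(word) if not word.isspace() else word for word in words]
--     return ''.join(masked_words)
-- ===== SOURCE B (Python) =====
-- def MaskPhrase(phrase):
--     # Single pass over runs: scan each maximal non-space run with an index
--     # pointer and emit its mask directly; no intermediate words list.
--     out = []
--     i, n = 0, len(phrase)
--     while i < n:
--         if phrase[i].isspace():
--             out.append(phrase[i])
--             i += 1
--         else:
--             j = i
--             while j < n and not phrase[j].isspace():
--                 j += 1
--             L = j - i
--             if L <= 3:
--                 out.append("?" * L)
--             else:
--                 out.append(phrase[i] + "?" * (L - 2) + phrase[j - 1])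
--             i = j
--     return ''.join(out)
-- ===== Notes on version B (the rewrite author's own statement) =====
-- stated objective: simpler
-- what changed: B replaces A's accumulator-built list of words/space tokens plus a masking comprehension and join with a single index-pointer pass that scans each maximal non-space run and emits its mask (or the space) directly.
import Mathlib
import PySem

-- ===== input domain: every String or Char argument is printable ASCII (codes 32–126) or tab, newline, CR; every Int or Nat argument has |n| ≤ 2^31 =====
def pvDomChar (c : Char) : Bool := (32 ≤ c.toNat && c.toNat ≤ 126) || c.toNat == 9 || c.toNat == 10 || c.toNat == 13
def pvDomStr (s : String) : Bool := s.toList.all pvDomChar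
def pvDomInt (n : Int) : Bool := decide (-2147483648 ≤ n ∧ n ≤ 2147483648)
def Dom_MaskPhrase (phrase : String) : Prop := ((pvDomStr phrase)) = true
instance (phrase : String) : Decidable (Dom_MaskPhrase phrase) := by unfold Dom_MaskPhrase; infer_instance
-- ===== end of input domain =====

-- B re-implements A's word/space tokenising pass as a direct run-scanning pass; same return value, no side effects.

-- ===== PORT A =====
-- mask_word; word[0] / word[-1] are ported as take 1 / drop (len-1), exact since that branch has len > 3
def pvMaskWordA (w : List Char) : List Char :=
  if w.length ≤ 3 then List.replicate w.length '?'
  else w.take 1 ++ List.replicate (w.length - 2) '?' ++ w.drop (w.length - 1)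

-- the loop body of A: state = (words, current_word)
def pvStepA (st : List (List Char) × List Char) (c : Char) : List (List Char) × List Char :=
  if PySem.Chars.isspace c then
    ((if st.2 ≠ [] then st.1 ++ [st.2] else st.1) ++ [[c]], [])
  else (st.1, st.2 ++ [c])

def MaskPhrase (phrase : String) : String :=
  let st := phrase.toList.foldl pvStepA ([], [])
  let words := if st.2 ≠ [] then st.1 ++ [st.2] else st.1
  String.ofList ((words.map (fun w =>
    if ¬ (PySem.Chars.strIsspace w = true) then pvMaskWordA w else w)).flatten)

-- ===== PORT B =====
-- the mask of one non-space run (Source B: phrase[i] + "?"*(L-2) + phrase[j-1])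
def pvMaskRunB (w : List Char) : List Char :=
  if w.length ≤ 3 then List.replicate w.length '?'
  else w.headD '?' :: (List.replicate (w.length - 2) '?' ++ [w.getLastD '?'])

-- Source B's outer while loop; the inner j-scan of a run is takeWhile/dropWhile (the same forward scan)
def MaskPhrase_altGo : List Char → List Char
  | [] => []
  | c :: rest =>
    if PySem.Chars.isspace c then c :: MaskPhrase_altGo rest
    else pvMaskRunB ((c :: rest).takeWhile (fun x => !PySem.Chars.isspace x))
         ++ MaskPhrase_altGo ((c :: rest).dropWhile (fun x => !PySem.Chars.isspace x))
termination_by l => l.length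
decreasing_by
  · simp
  · rename_i h
    simp only [List.dropWhile_cons, Bool.not_eq_true] at *
    simp [h]
    exact List.length_dropWhile_le _ _

def MaskPhrase_alt (phrase : String) : String :=
  String.ofList (MaskPhrase_altGo phrase.toList)

-- ===== PRECONDITION & SPEC =====
def Spec_MaskPhrase (phrase : String) (out : String) : Prop := out = MaskPhrase_alt phrase
instance (phrase : String) (out : String) : Decidable (Spec_MaskPhrase phrase out) := by unfold Spec_MaskPhrase; infer_instance

-- ===== CLAIM (what is proved, stated in full; the proofs are below) =====
def Claim_equal_MaskPhrase : Prop := ∀ (phrase : String), Dom_MaskPhrase phrase → Spec_MaskPhrase phrase (MaskPhrase phrase)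

-- ===== LEMMAS AND PROOFS =====

-- the words/spaces list A's first loop (plus the trailing flush) produces from remaining input cs and accumulator cur
def pvSplitA : List Char → List Char → List (List Char)
  | [], cur => if cur ≠ [] then [cur] else []
  | c :: cs, cur =>
    if PySem.Chars.isspace c then
      (if cur ≠ [] then [cur] else []) ++ [[c]] ++ pvSplitA cs []
    else pvSplitA cs (cur ++ [c])

theorem pvFoldA (cs : List Char) : ∀ (words : List (List Char)) (cur : List Char),
    (let st := cs.foldl pvStepA (words, cur)
     if st.2 ≠ [] then st.1 ++ [st.2] else st.1) = words ++ pvSplitA cs cur := by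
  induction cs with
  | nil => intro words cur; by_cases h : cur = [] <;> simp [pvSplitA, h]
  | cons c cs ih =>
    intro words cur
    by_cases h : PySem.Chars.isspace c
    · by_cases hc : cur = [] <;>
        simp [pvSplitA, pvStepA, h, hc, ih, List.append_assoc]
    · simp [pvSplitA, pvStepA, h, ih]

theorem pvDropOne : ∀ (t : List Char) (a : Char),
    List.drop t.length (a :: t) = [((a :: t).getLast?).getD '?']
  | [], _ => by simp
  | b :: u, a => by
    have := pvDropOne u b
    simpa [List.getLast?_cons_cons] using this

theorem pvMaskEq {w : List Char} (h : w ≠ []) : pvMaskWordA w = pvMaskRunB w := by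
  unfold pvMaskWordA pvMaskRunB
  by_cases hl : w.length ≤ 3
  · simp [hl]
  · cases w with
    | nil => simp at h
    | cons a t => simp [pvDropOne t a]

theorem pvNotSpaceStr {w : List Char} (h : w.all (fun x => !PySem.Chars.isspace x) = true)
    (hne : w ≠ []) : PySem.Chars.strIsspace w = false := by
  cases w with
  | nil => simp at hne
  | cons a t =>
    simp [List.all_cons] at h
    simp [PySem.Chars.strIsspace, List.all_cons, h.1]

theorem pvSpaceStr {c : Char} (h : PySem.Chars.isspace c = true) :
    PySem.Chars.strIsspace [c] = true := by
  simp [PySem.Chars.strIsspace, h]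

theorem pvMain (cs : List Char) : ∀ (cur : List Char),
    cur.all (fun x => !PySem.Chars.isspace x) = true →
    ((pvSplitA cs cur).map (fun w =>
      if ¬ (PySem.Chars.strIsspace w = true) then pvMaskWordA w else w)).flatten =
    (if cur = [] then MaskPhrase_altGo cs
     else pvMaskRunB (cur ++ cs.takeWhile (fun x => !PySem.Chars.isspace x))
          ++ MaskPhrase_altGo (cs.dropWhile (fun x => !PySem.Chars.isspace x))) := by
  induction cs with
  | nil =>
    intro cur hcur
    by_cases hc : cur = []
    · simp [pvSplitA, hc, MaskPhrase_altGo]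
    · simp [pvSplitA, hc, MaskPhrase_altGo, pvNotSpaceStr hcur hc, pvMaskEq hc]
  | cons c cs ih =>
    intro cur hcur
    by_cases h : PySem.Chars.isspace c = true
    · have hgo : MaskPhrase_altGo (c :: cs) = c :: MaskPhrase_altGo cs := by
        rw [MaskPhrase_altGo]; simp [h]
      by_cases hc : cur = []
      · simp [pvSplitA, h, hc, pvSpaceStr h, hgo]
        simpa using ih [] rfl
      · simp [pvSplitA, h, hc, pvSpaceStr h, hgo, pvNotSpaceStr hcur hc, pvMaskEq hc]
        simpa using ih [] rfl
    · have hcur' : (cur ++ [c]).all (fun x => !PySem.Chars.isspace x) = true := by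
        simp_all
      have := ih (cur ++ [c]) hcur'
      rw [if_neg (by simp)] at this
      rw [pvSplitA, if_neg (by simp [h])]
      rw [this]
      by_cases hc : cur = []
      · rw [MaskPhrase_altGo]
        simp [h, hc]
      · simp [hc, h]

-- ===== VERDICT (by name: the statement is the Claim_ definition above) =====
theorem MaskPhrase_spec : Claim_equal_MaskPhrase := by
  intro phrase _
  unfold Spec_MaskPhrase MaskPhrase MaskPhrase_alt
  simp only [pvFoldA phrase.toList [] []]
  rw [List.nil_append, pvMain phrase.toList [] (by simp)]
  simp
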